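-- pv_equiv track=rewrite | github.com/BradleyFang/jumpserve-back-end | netem_cubic_benchmark.py | _list_or_default
-- ===== SOURCE A (Python) =====
-- from typing import Any, Dict, List
--
-- def _list_or_default(values: List[Any], defaults: List[Any], count: int) -> List[Any]:
--     if values:
--         if len(values) != count:
--             raise ValueError(f"Expected {count} values but got {len(values)}.")
--         return values
--     out: List[Any] = []
--     for i in range(count):
--         out.append(defaults[i] if i < len(defaults) else defaults[-1])
--     return out
-- ===== SOURCE B (Python) =====
-- def _list_or_default(values, defaults, count):
--     if values:
--         if len(values) != count:
--             raise ValueError(f"Expected {count} values but got {len(values)}.")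
--         return values
--     n = max(0, count)
--     pad = n - len(defaults)
--     if pad > 0:
--         return defaults + [defaults[-1]] * pad
--     return defaults[:n]
-- ===== Notes on version B (the rewrite author's own statement) =====
-- stated objective: simpler
-- what changed: Replaces the element-by-element range loop with its per-iteration index-bound branch by a single slice of defaults plus list-multiplication padding with the last default.
import Mathlib
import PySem

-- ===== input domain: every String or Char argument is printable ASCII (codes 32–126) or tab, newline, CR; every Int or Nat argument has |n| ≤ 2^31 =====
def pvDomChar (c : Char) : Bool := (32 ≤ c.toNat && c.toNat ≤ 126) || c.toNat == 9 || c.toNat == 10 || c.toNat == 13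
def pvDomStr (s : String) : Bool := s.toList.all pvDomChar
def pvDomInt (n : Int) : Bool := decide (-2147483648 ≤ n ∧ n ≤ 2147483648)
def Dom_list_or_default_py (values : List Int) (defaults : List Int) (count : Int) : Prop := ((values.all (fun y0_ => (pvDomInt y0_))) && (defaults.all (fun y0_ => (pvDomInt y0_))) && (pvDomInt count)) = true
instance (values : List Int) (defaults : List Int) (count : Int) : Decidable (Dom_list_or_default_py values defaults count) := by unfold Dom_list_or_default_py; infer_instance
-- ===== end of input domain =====

-- B replaces A's element-by-element range loop by a slice of defaults plus replicate padding (simpler decomposition).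

-- ===== PORT A =====
def list_or_default_py (values : List Int) (defaults : List Int) (count : Int) : List Int :=
  if values ≠ [] then values          -- (len(values) ≠ count raises ValueError: excluded by Pre_)
  else
    (PySem.List.pyRange 0 count 1).foldl
      (fun out i => out ++ [if i < (defaults.length : Int)
                            then PySem.List.pyGetD defaults i 0
                            else PySem.List.pyGetD defaults (-1) 0]) []

-- ===== PORT B =====
def list_or_default_py_alt (values : List Int) (defaults : List Int) (count : Int) : List Int :=
  if values ≠ [] then values          -- same guard; ValueError case excluded by Pre_
  else
    let n : Int := max 0 count
    let pad : Int := n - (defaults.length : Int)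
    if pad > 0 then defaults ++ List.replicate pad.toNat (PySem.List.pyGetD defaults (-1) 0)
    else PySem.List.slice defaults none (some n)

-- ===== PRECONDITION & SPEC =====
-- Pre_ excludes exactly the inputs where A raises: ValueError when values is non-empty with the
-- wrong length, and IndexError (defaults[-1]) when values is empty, count > 0 and defaults is empty.
def Pre_list_or_default_py (values : List Int) (defaults : List Int) (count : Int) : Prop :=
  (values ≠ [] → (values.length : Int) = count) ∧ (values = [] → 0 < count → defaults ≠ [])
instance (values : List Int) (defaults : List Int) (count : Int) : Decidable (Pre_list_or_default_py values defaults count) := by unfold Pre_list_or_default_py; infer_instance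

def pvWitness_list_or_default_py : List Int × List Int × Int := ([], [1, 2], 4)

def Spec_list_or_default_py (values : List Int) (defaults : List Int) (count : Int) (out : List Int) : Prop := out = list_or_default_py_alt values defaults count
instance (values : List Int) (defaults : List Int) (count : Int) (out : List Int) : Decidable (Spec_list_or_default_py values defaults count out) := by unfold Spec_list_or_default_py; infer_instance

-- ===== CLAIM (what is proved, stated in full; the proofs are below) =====
def Claim_equal_list_or_default_py : Prop := ∀ (values : List Int) (defaults : List Int) (count : Int), Dom_list_or_default_py values defaults count → Pre_list_or_default_py values defaults count → Spec_list_or_default_py values defaults count (list_or_default_py values defaults count)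

-- ===== LEMMAS AND PROOFS =====

-- A's loop body over range n equals take-then-pad, when padding is only needed for non-empty defaults.
lemma pad_key (defaults : List Int) (d : Int) (n : Nat)
    (h : defaults.length < n → defaults ≠ []) :
    (List.range n).map (fun (k : Nat) => if (k : Int) < (defaults.length : Int)
                                 then defaults.getD k d
                                 else PySem.List.pyGetD defaults (-1) d)
      = defaults.take n ++ List.replicate (n - defaults.length) (PySem.List.pyGetD defaults (-1) d) := by
  induction n with
  | zero => simp
  | succ m ih =>
    have ih' := ih (fun hlt => h (Nat.lt_succ_of_lt hlt))
    rw [List.range_succ, List.map_append, ih']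
    by_cases hm : m < defaults.length
    · have h1 : defaults.take (m + 1) = defaults.take m ++ [defaults.getD m d] := by
        rw [List.take_add_one, List.getElem?_eq_getElem hm, List.getD_eq_getElem _ _ hm]
        rfl
      simp only [List.map_cons, List.map_nil]
      rw [if_pos (by exact_mod_cast hm), h1]
      have h2 : m + 1 - defaults.length = 0 := by omega
      have h3 : m - defaults.length = 0 := by omega
      simp [h2, h3]
    · have h1 : defaults.take (m + 1) = defaults ∧ defaults.take m = defaults := by
        constructor <;> exact List.take_of_length_le (by omega)
      have h2 : m + 1 - defaults.length = (m - defaults.length) + 1 := by omega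
      simp only [List.map_cons, List.map_nil]
      rw [if_neg (by exact_mod_cast hm), h1.1, h1.2, h2, List.replicate_succ' ]
      simp

-- ===== VERDICT (by name: the statement is the Claim_ definition above) =====
theorem list_or_default_py_spec : Claim_equal_list_or_default_py := by
  intro values defaults count _ hpre
  unfold Spec_list_or_default_py list_or_default_py list_or_default_py_alt
  by_cases hv : values ≠ []
  · simp [hv]
  · push_neg at hv
    simp only [hv, ne_eq, not_true_eq_false, if_false]
    rw [PySem.List.foldl_append_singleton_eq_map, List.nil_append, PySem.List.pyRange_one,
        Int.sub_zero, List.map_map]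
    have hmap : (List.range count.toNat).map
        ((fun i => if i < (defaults.length : Int)
                   then PySem.List.pyGetD defaults i 0
                   else PySem.List.pyGetD defaults (-1) 0) ∘ (fun k : Nat => (0 : Int) + (k : Int)))
        = (List.range count.toNat).map (fun (k : Nat) => if (k : Int) < (defaults.length : Int)
                                 then defaults.getD k 0
                                 else PySem.List.pyGetD defaults (-1) 0) := by
      apply List.map_congr_left
      intro k _
      simp [Function.comp]
    rw [hmap]
    by_cases hc : 0 < count
    · have hd : defaults ≠ [] := hpre.2 hv hc
      rw [pad_key defaults 0 count.toNat (fun _ => hd)]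
      by_cases hpad : (0 : Int) < max 0 count - (defaults.length : Int)
      · rw [if_pos hpad]
        have h1 : (max 0 count - (defaults.length : Int)).toNat = count.toNat - defaults.length := by
          omega
        rw [h1, List.take_of_length_le (by omega)]
      · rw [if_neg hpad]
        have hmax : max 0 count = count := by omega
        rw [hmax, PySem.List.slice_to defaults (by omega)]
        have h2 : count.toNat - defaults.length = 0 := by omega
        rw [h2]
        simp
    · have h0 : count.toNat = 0 := by omega
      rw [h0]
      rw [if_neg (by omega)]
      have hmax : max 0 count = 0 := by omega
      rw [hmax, PySem.List.slice_to defaults (by omega)]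
      simp
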